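-- pv_equiv track=rewrite | github.com/syntra-vindevoy/python-1-2024 | src/chapter9/strings/chap9ex.py | count_double_letters
-- ===== SOURCE A (Python) =====
-- def count_double_letters(word:str)->int:
--     """
--     Exercise 7
--     This question is based on a Puzzler that was broadcast on the radio program Car Talk
--     (http://www.cartalk.com/content/puzzlers):
--
--     Give me a word with three consecutive double letters. I’ll give you a couple of words that almost qualify, but don’t.
--     For example, the word committee, c-o-m-m-i-t-t-e-e. It would be great except for the ‘i’
--     that sneaks in there. Or Mississippi: M-i-s-s-i-s-s-i-p-p-i. If you could take out those i’s it
--      would work. But there is a word that has three consecutive pairs of letters and to the best of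
--      my knowledge this may be the only word. Of course there are probably 500 more but I can only think of one.
--      What is the word?
--     :param word:
--     :return:
--     """
--     count=0
--     pointer=0
--     while pointer < len(word)-1:
--         if word[pointer+1]==word[pointer]:
--             pointer+=2
--             count+=1
--         else:
--             pointer+=1
--     return count
-- ===== SOURCE B (Python) =====
-- def count_double_letters(word: str) -> int:
--     # Single run-length pass: within a maximal run of equal characters of
--     # length L, greedy left-to-right pairing yields exactly L // 2 pairs.
--     total = 0
--     run = 0
--     prev = None
--     for ch in word:
--         if ch == prev:
--             run += 1
--         else:
--             total += run // 2
--             prev = ch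
--             run = 1
--     return total + run // 2
-- ===== Notes on version B (the rewrite author's own statement) =====
-- stated objective: alternative
-- what changed: Replaces the index-pointer loop that skips ahead by 2 after each matched pair with a single run-length-encoding pass that sums floor(run_length/2) over maximal runs of equal characters.
import Mathlib
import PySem

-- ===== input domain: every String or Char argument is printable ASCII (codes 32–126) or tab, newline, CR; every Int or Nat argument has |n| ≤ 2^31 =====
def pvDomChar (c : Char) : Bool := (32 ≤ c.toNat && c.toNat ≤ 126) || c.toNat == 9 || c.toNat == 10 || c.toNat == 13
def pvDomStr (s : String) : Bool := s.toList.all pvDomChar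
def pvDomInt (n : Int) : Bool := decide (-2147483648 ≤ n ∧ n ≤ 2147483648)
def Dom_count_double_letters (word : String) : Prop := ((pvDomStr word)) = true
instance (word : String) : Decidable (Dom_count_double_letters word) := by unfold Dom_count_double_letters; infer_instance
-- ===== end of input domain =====

-- B replaces A's pointer-with-skip loop by one run-length pass summing run/2 per maximal run (objective: alternative).

-- ===== PORT A =====
-- A's while loop over the index pointer, as the obvious recursion on the
-- remaining characters: 'pointer < len-1' fails ⟺ fewer than 2 chars remain;
-- pointer += 2 drops two chars, pointer += 1 drops one; count is the accumulator.
def pvLoopA (count : Int) : List Char → Int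
  | [] => count
  | [_] => count
  | a :: b :: rest => if b == a then pvLoopA (count + 1) rest else pvLoopA count (b :: rest)

def count_double_letters (word : String) : Int := pvLoopA 0 word.toList

-- ===== PORT B =====
-- Source B's for-loop: state (total, run, prev); prev = None → Option Char.
def pvStepB (s : Int × Nat × Option Char) (ch : Char) : Int × Nat × Option Char :=
  if some ch == s.2.2 then (s.1, s.2.1 + 1, s.2.2)
  else (s.1 + (s.2.1 / 2 : Nat), 1, some ch)

def count_double_letters_alt (word : String) : Int :=
  let s := word.toList.foldl pvStepB (0, 0, none)
  s.1 + (s.2.1 / 2 : Nat)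

-- ===== PRECONDITION & SPEC =====
def Spec_count_double_letters (word : String) (out : Int) : Prop := out = count_double_letters_alt word
instance (word : String) (out : Int) : Decidable (Spec_count_double_letters word out) := by unfold Spec_count_double_letters; infer_instance

-- ===== CLAIM (what is proved, stated in full; the proofs are below) =====
def Claim_equal_count_double_letters : Prop := ∀ (word : String), Dom_count_double_letters word → Spec_count_double_letters word (count_double_letters word)

-- ===== LEMMAS AND PROOFS =====

def pvFin (s : Int × Nat × Option Char) : Int := s.1 + (s.2.1 / 2 : Nat)

-- A's loop with accumulator = accumulator + loop from 0 (fuel = list length).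
theorem pvLoopA_acc_aux (n : Nat) : ∀ (cs : List Char), cs.length ≤ n → ∀ (count : Int),
    pvLoopA count cs = count + pvLoopA 0 cs := by
  induction n with
  | zero =>
      intro cs h count
      have : cs = [] := List.eq_nil_of_length_eq_zero (Nat.le_zero.mp h)
      subst this; simp [pvLoopA]
  | succ n ih =>
      intro cs h count
      match cs with
      | [] => simp [pvLoopA]
      | [_] => simp [pvLoopA]
      | a :: b :: rest =>
          by_cases hab : b = a
          · subst hab
            simp only [pvLoopA, beq_self_eq_true, if_true]
            have hlen : rest.length ≤ n := by simp at h; omega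
            rw [ih rest hlen (count + 1), ih rest hlen (0 + 1)]
            ring
          · simp only [pvLoopA, if_neg (by simp [hab] : ¬ (b == a) = true)]
            have hlen : (b :: rest).length ≤ n := by simp at h ⊢; omega
            exact ih (b :: rest) hlen count

theorem pvLoopA_acc (cs : List Char) (count : Int) : pvLoopA count cs = count + pvLoopA 0 cs :=
  pvLoopA_acc_aux cs.length cs (le_refl _) count

-- Padding lemma: a run of n equal chars in front of a list not starting with c
-- contributes exactly n/2 to A's count.
theorem pvLoopA_replicate (n : Nat) : ∀ (c : Char) (cs : List Char), cs.head? ≠ some c →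
    pvLoopA 0 (List.replicate n c ++ cs) = (n / 2 : Nat) + pvLoopA 0 cs := by
  induction n using Nat.twoStepInduction with
  | zero => intro c cs _; simp
  | one =>
      intro c cs h
      cases cs with
      | nil => simp [pvLoopA]
      | cons d rest =>
          simp at h
          simp [List.replicate, pvLoopA, h]
  | more n ih _ =>
      intro c cs h
      have hrep : List.replicate (n + 2) c ++ cs = c :: c :: (List.replicate n c ++ cs) := by
        simp [List.replicate]
      rw [hrep]
      simp only [pvLoopA, beq_self_eq_true, if_true]
      rw [pvLoopA_acc, ih c cs h]
      have h2 : (n + 2) / 2 = n / 2 + 1 := by omega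
      rw [h2]
      push_cast
      ring

-- B's fold from state (t, n, some c) equals t + A's count of (replicate n c ++ cs).
theorem pvFoldB (cs : List Char) : ∀ (t : Int) (n : Nat) (c : Char),
    pvFin (cs.foldl pvStepB (t, n, some c)) = t + pvLoopA 0 (List.replicate n c ++ cs) := by
  induction cs with
  | nil =>
      intro t n c
      have h0 := pvLoopA_replicate n c [] (by simp)
      rw [List.append_nil] at h0
      simp [pvFin, pvLoopA, h0]
  | cons d rest ih =>
      intro t n c
      by_cases h : d = c
      · subst h
        have hstep : pvStepB (t, n, some d) d = (t, n + 1, some d) := by simp [pvStepB]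
        rw [List.foldl_cons, hstep, ih t (n + 1) d]
        have : List.replicate (n + 1) d ++ rest = List.replicate n d ++ d :: rest := by
          simp [List.replicate_succ']
        rw [this]
      · have hstep : pvStepB (t, n, some c) d = (t + (n / 2 : Nat), 1, some d) := by
          simp [pvStepB, h]
        rw [List.foldl_cons, hstep, ih (t + (n / 2 : Nat)) 1 d]
        rw [pvLoopA_replicate n c (d :: rest) (by simp [h])]
        have : List.replicate 1 d ++ rest = d :: rest := by simp
        rw [this]
        ring

theorem pv_main (cs : List Char) : pvLoopA 0 cs = pvFin (cs.foldl pvStepB (0, 0, none)) := by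
  cases cs with
  | nil => simp [pvLoopA, pvFin]
  | cons c rest =>
      have hstep : pvStepB (0, 0, none) c = (0, 1, some c) := by simp [pvStepB]
      rw [List.foldl_cons, hstep, pvFoldB rest 0 1 c]
      simp

-- ===== VERDICT (by name: the statement is the Claim_ definition above) =====
theorem count_double_letters_spec : Claim_equal_count_double_letters := by
  intro word _
  unfold Spec_count_double_letters count_double_letters count_double_letters_alt
  exact pv_main word.toList
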